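-- pv_equiv track=rewrite | github.com/robertvazan/llobot | llobot/text.py | join_documents
-- ===== SOURCE A (Python) =====
-- from typing import Iterable
--
-- def terminate_document(text: str) -> str:
--     """Adds a terminal newline to the text if it doesn't have one."""
--     return text if not text or text.endswith('\n') else text + '\n'
--
-- def join_documents(separator: str, documents: Iterable[str | None]) -> str:
--     """
--     Joins a collection of documents with a separator.
--
--     It ensures that all documents except the last one end with a newline before joining.
--     The last document is not modified. This means the result is not terminated with a
--     newline unless the last document was.
--     """
--     docs = [doc for doc in documents if doc and doc.strip()]
--     if not docs:
--         return ""
--     if len(docs) == 1: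
--         return docs[0]
--     terminated_front = [terminate_document(d) for d in docs[:-1]]
--     return separator.join(terminated_front + [docs[-1]])
-- ===== SOURCE B (Python) =====
-- from typing import Iterable
--
--
-- def join_documents(separator: str, documents: Iterable[str | None]) -> str:
--     acc = ""
--     pending = None
--     for doc in documents:
--         if doc and doc.strip():
--             if pending is not None:
--                 acc += pending if pending.endswith('\n') else pending + '\n'
--                 acc += separator
--             pending = doc
--     return acc + pending if pending is not None else ""
-- ===== Notes on version B (the rewrite author's own statement) =====
-- stated objective: alternative
-- what changed: Replaces A's filter-to-list, [:-1]/[-1] slice split, terminated-front list and str.join with a single pass that keeps one pending document and appends it (terminated, plus separator) to a string accumulator as soon as a later kept document appears.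
import Mathlib
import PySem

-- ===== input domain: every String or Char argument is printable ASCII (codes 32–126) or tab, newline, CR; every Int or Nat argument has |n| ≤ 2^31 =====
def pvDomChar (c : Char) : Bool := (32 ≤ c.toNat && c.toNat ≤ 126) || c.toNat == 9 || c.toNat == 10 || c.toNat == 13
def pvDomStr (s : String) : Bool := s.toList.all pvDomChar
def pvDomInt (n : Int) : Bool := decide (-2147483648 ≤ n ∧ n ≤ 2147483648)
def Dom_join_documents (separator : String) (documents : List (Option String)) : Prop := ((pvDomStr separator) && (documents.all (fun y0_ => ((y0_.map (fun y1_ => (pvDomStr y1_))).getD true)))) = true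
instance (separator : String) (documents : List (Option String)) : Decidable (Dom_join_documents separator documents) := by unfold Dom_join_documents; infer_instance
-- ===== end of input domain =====

-- ===== PORT A =====
-- B replaces A's filter-to-list + [:-1]/[-1] slice split + terminated-front list + str.join
-- with a single pass holding one pending document (objective: alternative decomposition).

def terminate_document (text : String) : String :=
  if text = "" || PySem.Str.endswith text "\n" then text else text ++ "\n"

def join_documents (separator : String) (documents : List (Option String)) : String :=
  let docs := documents.filterMap (fun doc => match doc with
    | none => none
    | some d => if d ≠ "" ∧ PySem.Str.strip d ≠ "" then some d else none)
  if docs = [] then ""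
  else if docs.length = 1 then docs.headD ""
  else
    let terminated_front := (PySem.List.slice docs none (some (-1))).map terminate_document
    PySem.Str.join separator (terminated_front ++ [PySem.List.pyGetD docs (-1) ""])

-- ===== PORT B =====

-- loop body of Source B: state = (acc, pending)
def join_step (separator : String) (st : String × Option String) (doc : Option String) :
    String × Option String :=
  match doc with
  | none => st
  | some d =>
    if d ≠ "" ∧ PySem.Str.strip d ≠ "" then
      match st.2 with
      | none => (st.1, some d)
      | some pending =>
        (st.1 ++ (if PySem.Str.endswith pending "\n" then pending else pending ++ "\n")
          ++ separator, some d)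
    else st

def join_documents_alt (separator : String) (documents : List (Option String)) : String :=
  let st := documents.foldl (join_step separator) ("", none)
  match st.2 with
  | none => ""
  | some pending => st.1 ++ pending

-- ===== PRECONDITION & SPEC =====
def Spec_join_documents (separator : String) (documents : List (Option String)) (out : String) : Prop := out = join_documents_alt separator documents
instance (separator : String) (documents : List (Option String)) (out : String) : Decidable (Spec_join_documents separator documents out) := by unfold Spec_join_documents; infer_instance

-- ===== CLAIM (what is proved, stated in full; the proofs are below) =====
def Claim_equal_join_documents : Prop := ∀ (separator : String) (documents : List (Option String)), Dom_join_documents separator documents → Spec_join_documents separator documents (join_documents separator documents)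

-- ===== LEMMAS AND PROOFS =====

-- proof-side: the common value both ports compute on the kept list
def pvJr (sep : String) : List String → String
  | [] => ""
  | [d] => d
  | d :: e :: r =>
    (if PySem.Str.endswith d "\n" then d else d ++ "\n") ++ sep ++ pvJr sep (e :: r)

def pvFin : String × Option String → String
  | (_, none) => ""
  | (a, some p) => a ++ p

theorem pvJoin_singleton (s x : String) : PySem.Str.join s [x] = x := by
  simp [PySem.Str.join, PySem.Chars.join_singleton]

theorem pvJoin_cons (s x : String) (l : List String) (h : l ≠ []) :
    PySem.Str.join s (x :: l) = x ++ s ++ PySem.Str.join s l := by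
  match l with
  | y :: r => simp [PySem.Str.join, PySem.Chars.join_cons_cons, String.append_assoc]

-- A's terminated-front ++ [last] joined equals pvJr, for nonempty lists of nonempty docs
theorem pvAssemble (sep : String) : ∀ (l : List String), l ≠ [] → (∀ d ∈ l, d ≠ "") →
    PySem.Str.join sep (l.dropLast.map terminate_document ++ [PySem.List.pyGetD l (-1) ""])
      = pvJr sep l := by
  intro l
  induction l with
  | nil => intro h; exact absurd rfl h
  | cons d rest ih =>
    intro _ hb
    cases rest with
    | nil =>
      simp [pvJr, PySem.List.pyGetD_neg_one (xs := [d]) "" (by simp), pvJoin_singleton]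
    | cons e r =>
      have hb' : ∀ x ∈ e :: r, x ≠ "" := fun x hx => hb x (List.mem_cons_of_mem _ hx)
      have hd : d ≠ "" := hb d (List.mem_cons_self)
      have hlast : PySem.List.pyGetD (d :: e :: r) (-1) ""
          = PySem.List.pyGetD (e :: r) (-1) "" := by
        rw [PySem.List.pyGetD_neg_one _ "" (by simp), PySem.List.pyGetD_neg_one _ "" (by simp)]
        exact List.getLast_cons _
      have hdrop : (d :: e :: r).dropLast = d :: (e :: r).dropLast := by simp
      rw [hdrop, hlast, List.map_cons, List.cons_append,
        pvJoin_cons _ _ _ (by simp), ih (by simp) hb']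
      have hterm : terminate_document d
          = (if PySem.Str.endswith d "\n" then d else d ++ "\n") := by
        simp [terminate_document, hd]
      simp [pvJr, hterm]

-- every document kept by the filter is nonempty
theorem pvKept_ne_empty (documents : List (Option String)) :
    ∀ d ∈ documents.filterMap (fun doc => match doc with
      | none => none
      | some s => if s ≠ "" ∧ PySem.Str.strip s ≠ "" then some s else none), d ≠ "" := by
  intro d hd
  rcases List.mem_filterMap.mp hd with ⟨a, _, ha⟩
  cases a with
  | none => simp at ha
  | some s =>
    dsimp only at ha
    by_cases hc : s ≠ "" ∧ PySem.Str.strip s ≠ ""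
    · rw [if_pos hc] at ha
      injection ha with h
      exact h ▸ hc.1
    · simp [hc] at ha

-- B's loop with a pending document p computes acc ++ pvJr (p :: kept)
theorem pvFoldSome (sep : String) : ∀ (docs : List (Option String)) (acc p : String),
    pvFin (docs.foldl (join_step sep) (acc, some p))
      = acc ++ pvJr sep (p :: docs.filterMap (fun doc => match doc with
          | none => none
          | some s => if s ≠ "" ∧ PySem.Str.strip s ≠ "" then some s else none)) := by
  intro docs
  induction docs with
  | nil => intro acc p; simp [pvFin, pvJr]
  | cons doc rest ih =>
    intro acc p
    cases doc with
    | none => simpa [join_step] using ih acc p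
    | some d =>
      by_cases hc : d ≠ "" ∧ PySem.Str.strip d ≠ ""
      · simp only [List.foldl_cons, join_step, if_pos hc, List.filterMap_cons]
        rw [ih]
        simp [pvJr, String.append_assoc]
      · simp only [List.foldl_cons, join_step, if_neg hc, List.filterMap_cons]
        rw [ih]

theorem pvFoldNone (sep : String) : ∀ (docs : List (Option String)),
    pvFin (docs.foldl (join_step sep) ("", none))
      = pvJr sep (docs.filterMap (fun doc => match doc with
          | none => none
          | some s => if s ≠ "" ∧ PySem.Str.strip s ≠ "" then some s else none)) := by
  intro docs
  induction docs with
  | nil => simp [pvFin, pvJr]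
  | cons doc rest ih =>
    cases doc with
    | none => simpa [join_step] using ih
    | some d =>
      by_cases hc : d ≠ "" ∧ PySem.Str.strip d ≠ ""
      · simp only [List.foldl_cons, join_step, if_pos hc, List.filterMap_cons]
        rw [pvFoldSome]
        simp
      · simp only [List.foldl_cons, join_step, if_neg hc, List.filterMap_cons]
        rw [ih]

theorem pvAlt_eq (sep : String) (documents : List (Option String)) :
    join_documents_alt sep documents
      = pvFin (documents.foldl (join_step sep) ("", none)) := by
  unfold join_documents_alt
  rcases h : documents.foldl (join_step sep) ("", none) with ⟨a, p⟩
  cases p <;> rfl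

-- ===== VERDICT (by name: the statement is the Claim_ definition above) =====
theorem join_documents_spec : Claim_equal_join_documents := by
  unfold Claim_equal_join_documents Spec_join_documents
  intro separator documents _
  rw [pvAlt_eq, pvFoldNone]
  unfold join_documents
  set docs := documents.filterMap (fun doc => match doc with
    | none => none
    | some d => if d ≠ "" ∧ PySem.Str.strip d ≠ "" then some d else none) with hdocs
  have hne : ∀ d ∈ docs, d ≠ "" := hdocs ▸ pvKept_ne_empty documents
  match docs with
  | [] => simp [pvJr]
  | [d] => simp [pvJr]
  | d :: e :: r =>
    have hlen : (d :: e :: r).length ≠ 1 := by simp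
    rw [if_neg (by simp), if_neg hlen, PySem.List.slice_to_neg_one,
      pvAssemble separator (d :: e :: r) (by simp) hne]
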